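-- pv_equiv track=rewrite | github.com/nguyn21012003/thesis | solution/pythonfile/file_python/chernNumbers.py | chern
-- ===== SOURCE A (Python) =====
-- def chern(p, q):
--     sr_list, tr_list, kj_list = [], [], []
--     for r in range(q + 1):
--         if q % 2 == 0 and r == q / 2:
--             continue
--         for tr in range(-int(q / 2), int(q / 2) + 1):
--             for sr in range(-q, q + 1):
--                 if r == q * sr + p * tr:
--                     sr_list.append(sr)
--                     tr_list.append(tr)
--                     kj_list.append(q // 2)
--                     break
--             else:
--                 continue
--             break
--
--     Chern_list = []
--     if q % 2 != 0:
--         numb_band_groups = q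
--     else:
--         numb_band_groups = q - 1
--
--     for i in range(numb_band_groups):
--         Chern_list.append(tr_list[i + 1] - tr_list[i])
--
--     if q % 2 == 0:
--         Chern_list.insert(q // 2 - 1, Chern_list[q // 2 - 1])
--
--     return Chern_list, tr_list
-- ===== SOURCE B (Python) =====
-- def chern(p, q):
--     # Return-value re-implementation: the O(q) inner brute-force scan for sr is
--     # replaced by a divisibility test and direct division (O(q^2) total instead
--     # of O(q^3)); the difference list is built by zipping instead of indexing.
--     h = q // 2
--     tr_list = []
--     for r in range(q + 1):
--         if q % 2 == 0 and 2 * r == q: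
--             continue
--         for tr in range(-h, h + 1):
--             d = r - p * tr
--             if d % q == 0 and -q <= d // q <= q:
--                 tr_list.append(tr)
--                 break
--     chern_list = [b - a for a, b in zip(tr_list, tr_list[1:])]
--     if q % 2 == 0 and q > 0:
--         k = q // 2 - 1
--         chern_list = chern_list[:k] + [chern_list[k]] + chern_list[k:]
--     return chern_list, tr_list
-- ===== Notes on version B (the rewrite author's own statement) =====
-- stated objective: faster
-- what changed: The innermost O(q) brute-force scan over sr is replaced by a divisibility test with a direct division (O(q^3) -> O(q^2)), and the Chern-difference list is built by zipping consecutive elements instead of an indexed loop with a mid-list insert.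
import Mathlib
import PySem

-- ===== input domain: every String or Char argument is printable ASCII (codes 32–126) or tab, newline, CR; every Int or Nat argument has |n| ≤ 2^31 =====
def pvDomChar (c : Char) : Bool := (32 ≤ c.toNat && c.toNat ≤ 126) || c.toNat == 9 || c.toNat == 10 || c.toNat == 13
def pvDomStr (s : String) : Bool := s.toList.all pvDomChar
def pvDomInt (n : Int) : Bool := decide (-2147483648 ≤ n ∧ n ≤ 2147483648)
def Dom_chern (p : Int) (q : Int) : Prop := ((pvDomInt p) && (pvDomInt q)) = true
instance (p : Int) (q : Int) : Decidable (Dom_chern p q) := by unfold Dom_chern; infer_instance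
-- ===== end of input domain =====

-- B replaces A's innermost brute-force scan for sr by a divisibility test with a
-- direct division, and builds the difference list by zipping instead of indexing
-- (objective: faster, one loop level removed).

-- ===== PORT A =====
-- inner 'for sr in range(-q, q+1): if r == q*sr + p*tr: … break' (first hit)
def chernInnerA (p q r tr : Int) : Option Int :=
  List.find? (fun sr => r == q * sr + p * tr) (PySem.List.pyRange (-q) (q + 1))

-- middle 'for tr in …: <inner>; break/else continue' — first tr whose inner scan hits;
-- int(q/2) truncates toward zero, which is Int.tdiv (the float q/2 is exact for |q| ≤ 2^31)
def chernFindA (p q r : Int) : Option (Int × Int) :=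
  List.findSome? (fun tr => (chernInnerA p q r tr).map (fun sr => (sr, tr)))
    (PySem.List.pyRange (-(Int.tdiv q 2)) (Int.tdiv q 2 + 1))

-- the r-loop, carrying (sr_list, tr_list, kj_list)
def chernLoopA (p q : Int) : List Int × List Int × List Int :=
  (PySem.List.pyRange 0 (q + 1)).foldl
    (fun (st : List Int × List Int × List Int) r =>
      -- 'r == q / 2' compares with the exact float q/2; under 'q % 2 == 0' this is r == q÷2 (tdiv)
      if PySem.Int.mod q 2 == 0 && r == Int.tdiv q 2 then st
      else
        match chernFindA p q r with
        | some (sr, tr) => (st.1 ++ [sr], st.2.1 ++ [tr], st.2.2 ++ [PySem.Int.floordiv q 2])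
        | none => st)
    ([], [], [])

def chern (p : Int) (q : Int) : List Int × List Int :=
  let st := chernLoopA p q
  let trs := st.2.1
  let numb : Int := if PySem.Int.mod q 2 != 0 then q else q - 1
  -- tr_list[i+1] - tr_list[i]; out-of-range (an IndexError in Python) is excluded by Pre_chern
  let ch := (PySem.List.pyRange 0 numb).foldl
    (fun acc i => acc ++ [PySem.List.pyGetD trs (i + 1) 0 - PySem.List.pyGetD trs i 0]) []
  let ch2 := if PySem.Int.mod q 2 == 0
    then PySem.List.insert ch (PySem.Int.floordiv q 2 - 1)
           (PySem.List.pyGetD ch (PySem.Int.floordiv q 2 - 1) 0)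
    else ch
  (ch2, trs)

-- ===== PORT B =====
-- 'd % q == 0 and -q <= d // q <= q' from Source B
def chernTestB (p q r tr : Int) : Bool :=
  let d := r - p * tr
  PySem.Int.mod d q == 0 && decide (-q ≤ PySem.Int.floordiv d q) && decide (PySem.Int.floordiv d q ≤ q)

-- the r-loop of Source B: append the first tr passing the test, if any
def chernLoopB (p q : Int) : List Int :=
  let h := PySem.Int.floordiv q 2
  (PySem.List.pyRange 0 (q + 1)).foldl
    (fun acc r =>
      if PySem.Int.mod q 2 == 0 && 2 * r == q then acc
      else
        match List.find? (chernTestB p q r) (PySem.List.pyRange (-h) (h + 1)) with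
        | some tr => acc ++ [tr]
        | none => acc)
    []

def chern_alt (p : Int) (q : Int) : List Int × List Int :=
  let trs := chernLoopB p q
  -- [b - a for a, b in zip(tr_list, tr_list[1:])]
  let ch := (trs.zip (PySem.List.slice trs (some 1) none)).map (fun ab => ab.2 - ab.1)
  if PySem.Int.mod q 2 == 0 && decide (0 < q) then
    let k := PySem.Int.floordiv q 2 - 1
    -- chern_list[:k] + [chern_list[k]] + chern_list[k:]; the k-indexing raises outside Pre_chern
    (PySem.List.slice ch none (some k) ++ [PySem.List.pyGetD ch k 0] ++ PySem.List.slice ch (some k) none, trs)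
  else (ch, trs)

-- ===== PRECONDITION & SPEC =====
-- the extreme tr value A's search can be forced to use (q//2, or q//2 - 1 when q is even,
-- because the middle band r = q/2 — the only one whose tr is ±q//2 — is skipped)
def chernBound (q : Int) : Int :=
  if PySem.Int.mod q 2 = 0 then PySem.Int.floordiv q 2 - 1 else PySem.Int.floordiv q 2
-- Pre_ excludes exactly the inputs where A raises IndexError: q = 0, negative even q, and
-- positive q ≥ 3 where gcd(p,q) ≠ 1 or the band at the extreme tr = ±chernBound q needs an
-- sr with |sr| > q — in all those cases some band has no (sr,tr) and tr_list is left short.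
def Pre_chern (p : Int) (q : Int) : Prop :=
  (0 < q ∧ q ≤ 2)
  ∨ (2 < q ∧ Int.gcd p q = 1 ∧
      -q ≤ PySem.Int.floordiv (p * chernBound q) q ∧ PySem.Int.floordiv (p * chernBound q) q ≤ q ∧
      -q ≤ PySem.Int.floordiv (p * -chernBound q) q ∧ PySem.Int.floordiv (p * -chernBound q) q ≤ q)
  ∨ (q < 0 ∧ PySem.Int.mod q 2 = 1)
instance (p : Int) (q : Int) : Decidable (Pre_chern p q) := by unfold Pre_chern; infer_instance

def pvWitness_chern : Int × Int := (1, 3)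

def Spec_chern (p : Int) (q : Int) (out : List Int × List Int) : Prop := out = chern_alt p q
instance (p : Int) (q : Int) (out : List Int × List Int) : Decidable (Spec_chern p q out) := by unfold Spec_chern; infer_instance

-- ===== CLAIM (what is proved, stated in full; the proofs are below) =====
def Claim_equal_chern : Prop := ∀ (p : Int) (q : Int), Dom_chern p q → Pre_chern p q → Spec_chern p q (chern p q)

-- ===== LEMMAS AND PROOFS =====

-- when q is even, A's skip test 'r == q÷2' coincides with B's '2*r == q'
theorem chern_skip_eq (q r : Int) (he : PySem.Int.mod q 2 = 0) :
    (r == Int.tdiv q 2) = (2 * r == q) := by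
  obtain ⟨c, hc⟩ := (PySem.Int.mod_eq_zero_iff_dvd q 2).mp he
  subst hc
  rw [Int.mul_tdiv_cancel_left _ (by norm_num)]
  rcases eq_or_ne r c with h | h <;> simp [h]

-- for q > 0, A's inner scan hits iff B's divisibility test passes
theorem chern_inner_eq (p q r tr : Int) (hq : 0 < q) :
    (chernInnerA p q r tr).isSome = chernTestB p q r tr := by
  have hq0 : q ≠ 0 := by omega
  apply Bool.eq_iff_iff.mpr
  rw [chernInnerA, List.find?_isSome]
  simp only [chernTestB, Bool.and_eq_true, beq_iff_eq, decide_eq_true_eq,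
    PySem.List.mem_pyRange_one, PySem.Int.mod_eq_zero_iff_dvd,
    PySem.Int.floordiv_eq_ediv_of_pos hq]
  constructor
  · rintro ⟨sr, ⟨h1, h2⟩, h3⟩
    have hd : r - p * tr = q * sr := by omega
    rw [hd, Int.mul_ediv_cancel_left _ hq0]
    exact ⟨⟨⟨sr, rfl⟩, by omega⟩, by omega⟩
  · rintro ⟨⟨hdvd, h1⟩, h2⟩
    refine ⟨(r - p * tr) / q, ⟨by omega, by omega⟩, ?_⟩
    have h3 : q * ((r - p * tr) / q) = r - p * tr := by
      rw [Int.mul_comm]; exact Int.ediv_mul_cancel hdvd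
    omega

theorem findSome?_map_snd (l : List Int) (f : Int → Option Int) (t : Int → Bool)
    (h : ∀ x ∈ l, (f x).isSome = t x) :
    (List.findSome? (fun x => (f x).map (fun sr => (sr, x))) l).map Prod.snd = List.find? t l := by
  induction l with
  | nil => rfl
  | cons a l ih =>
    have ha := h a (by simp)
    rw [List.findSome?_cons, List.find?_cons]
    cases hfa : f a with
    | none =>
      have : t a = false := by rw [← ha, hfa]; rfl
      rw [this]
      exact ih (fun x hx => h x (by simp [hx]))
    | some sr =>
      have ht : t a = true := by rw [← ha, hfa]; rfl
      simp [ht]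


-- A's loop state is a triple; its tr_list component evolves like B's single list
theorem foldl_snd1 {f : (List Int × List Int × List Int) → Int → (List Int × List Int × List Int)}
    {g : List Int → Int → List Int} :
    ∀ (l : List Int), (∀ r ∈ l, ∀ st, (f st r).2.1 = g st.2.1 r) →
      ∀ st, (l.foldl f st).2.1 = l.foldl g st.2.1 := by
  intro l
  induction l with
  | nil => intro _ st; rfl
  | cons a l ih =>
    intro h st
    rw [List.foldl_cons, List.foldl_cons, ih (fun r hr => h r (by simp [hr])), h a (by simp)]

-- one element per loop iteration, as a list
def chernGB (p q r : Int) : List Int :=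
  if PySem.Int.mod q 2 == 0 && 2 * r == q then []
  else
    match List.find? (chernTestB p q r)
        (PySem.List.pyRange (-(PySem.Int.floordiv q 2)) (PySem.Int.floordiv q 2 + 1)) with
    | some tr => [tr]
    | none => []

theorem chernLoopB_eq_flatMap (p q : Int) :
    chernLoopB p q = (PySem.List.pyRange 0 (q + 1)).flatMap (chernGB p q) := by
  rw [chernLoopB]
  have hstep : (fun (acc : List Int) r =>
      if PySem.Int.mod q 2 == 0 && 2 * r == q then acc
      else
        match List.find? (chernTestB p q r)
            (PySem.List.pyRange (-(PySem.Int.floordiv q 2)) (PySem.Int.floordiv q 2 + 1)) with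
        | some tr => acc ++ [tr]
        | none => acc)
      = fun (acc : List Int) r => acc ++ chernGB p q r := by
    funext acc r
    rw [chernGB]
    split_ifs with h
    · simp
    · cases hf : List.find? (chernTestB p q r)
          (PySem.List.pyRange (-(PySem.Int.floordiv q 2)) (PySem.Int.floordiv q 2 + 1)) with
      | some tr => simp
      | none => simp
  rw [hstep, PySem.List.foldl_append_eq_flatMap]
  simp

-- A's loop produces the same tr_list as B's
theorem chern_trs_eq (p q : Int) : (chernLoopA p q).2.1 = chernLoopB p q := by
  rw [chernLoopA, chernLoopB]
  apply foldl_snd1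
  intro r hr st
  rw [PySem.List.mem_pyRange_one] at hr
  by_cases hq : 0 < q
  · have hdiv : Int.tdiv q 2 = PySem.Int.floordiv q 2 := by
      rw [PySem.Int.floordiv_eq_ediv_of_pos (show (0:Int) < 2 by norm_num),
          Int.tdiv_eq_ediv, if_pos (Or.inl (by omega : (0:Int) ≤ q))]
      ring
    have hcond : (PySem.Int.mod q 2 == 0 && (r == Int.tdiv q 2))
        = (PySem.Int.mod q 2 == 0 && (2 * r == q)) := by
      rcases PySem.Int.mod_two_eq q with he | ho
      · rw [chern_skip_eq q r he]
      · have h0 : (PySem.Int.mod q 2 == 0) = false := by rw [ho]; rfl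
        rw [h0, Bool.false_and, Bool.false_and]
    rw [hcond]
    have hf : (chernFindA p q r).map Prod.snd
        = List.find? (chernTestB p q r)
            (PySem.List.pyRange (-(PySem.Int.floordiv q 2)) (PySem.Int.floordiv q 2 + 1)) := by
      rw [chernFindA, hdiv]
      exact findSome?_map_snd _ _ _ (fun tr _ => chern_inner_eq p q r tr hq)
    split_ifs with hc
    · rfl
    · cases hA : chernFindA p q r with
      | none =>
        rw [hA] at hf
        simp only [Option.map_none] at hf
        rw [← hf]
      | some v =>
        rw [hA] at hf
        simp only [Option.map_some] at hf
        rw [← hf]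
  · -- here 0 ≤ r < q + 1 forces q = 0 and r = 0, and both sides skip
    have hq0 : q = 0 := by omega
    have hr0 : r = 0 := by omega
    subst hq0; subst hr0
    simp

theorem flatMap_len_one {g : Int → List Int} :
    ∀ l : List Int, (∀ x ∈ l, (g x).length = 1) → (l.flatMap g).length = l.length := by
  intro l
  induction l with
  | nil => intro _; rfl
  | cons a l ih =>
    intro h
    rw [List.flatMap_cons, List.length_append, h a (by simp), ih (fun x hx => h x (by simp [hx])),
        List.length_cons]
    omega

theorem chernGB_len (p q r : Int) (hs : ¬(PySem.Int.mod q 2 = 0 ∧ 2 * r = q))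
    (hex : ∃ tr ∈ PySem.List.pyRange (-(PySem.Int.floordiv q 2)) (PySem.Int.floordiv q 2 + 1),
        PySem.Int.mod (r - p * tr) q = 0 ∧
        -q ≤ PySem.Int.floordiv (r - p * tr) q ∧ PySem.Int.floordiv (r - p * tr) q ≤ q) :
    (chernGB p q r).length = 1 := by
  rw [chernGB, if_neg (by simp only [Bool.and_eq_true, beq_iff_eq]; exact hs)]
  obtain ⟨tr, htr, h1, h2, h3⟩ := hex
  have ht : chernTestB p q r tr = true := by
    simp only [chernTestB, Bool.and_eq_true, beq_iff_eq, decide_eq_true_eq]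
    exact ⟨⟨h1, h2⟩, h3⟩
  have := List.find?_isSome.mpr ⟨tr, htr, ht⟩
  cases hfind : List.find? (chernTestB p q r)
      (PySem.List.pyRange (-(PySem.Int.floordiv q 2)) (PySem.Int.floordiv q 2 + 1)) with
  | none => rw [hfind] at this; simp at this
  | some v => rfl

-- under Pre_, the tr_list has one entry per unskipped r
theorem chern_trs_len (p q : Int) (hq : 0 < q)
    (hall : ∀ r ∈ PySem.List.pyRange 0 (q + 1),
      (PySem.Int.mod q 2 = 0 ∧ 2 * r = q) ∨
      ∃ tr ∈ PySem.List.pyRange (-(PySem.Int.floordiv q 2)) (PySem.Int.floordiv q 2 + 1),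
        PySem.Int.mod (r - p * tr) q = 0 ∧
        -q ≤ PySem.Int.floordiv (r - p * tr) q ∧ PySem.Int.floordiv (r - p * tr) q ≤ q) :
    (chernLoopB p q).length = if PySem.Int.mod q 2 = 0 then q.toNat else (q + 1).toNat := by
  rw [chernLoopB_eq_flatMap]
  rcases PySem.Int.mod_two_eq q with he | ho
  · -- even
    obtain ⟨c, hc⟩ := (PySem.Int.mod_eq_zero_iff_dvd q 2).mp he
    rw [if_pos he]
    have hc1 : 1 ≤ c := by omega
    rw [PySem.List.pyRange_one_append 0 c (q + 1) (by omega) (by omega),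
        PySem.List.pyRange_one_cons (show c < q + 1 by omega)]
    rw [List.flatMap_append, List.flatMap_cons]
    have hgc : chernGB p q c = [] := by
      rw [chernGB, if_pos (by simp only [Bool.and_eq_true, beq_iff_eq]; omega)]
    have hl1 : ((PySem.List.pyRange 0 c).flatMap (chernGB p q)).length
        = (PySem.List.pyRange 0 c).length := by
      apply flatMap_len_one
      intro r hrm
      rw [PySem.List.mem_pyRange_one] at hrm
      rcases hall r (by rw [PySem.List.mem_pyRange_one]; omega) with hskip | hex
      · omega
      · exact chernGB_len p q r (by omega) hex
    have hl2 : ((PySem.List.pyRange (c + 1) (q + 1)).flatMap (chernGB p q)).length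
        = (PySem.List.pyRange (c + 1) (q + 1)).length := by
      apply flatMap_len_one
      intro r hrm
      rw [PySem.List.mem_pyRange_one] at hrm
      rcases hall r (by rw [PySem.List.mem_pyRange_one]; omega) with hskip | hex
      · omega
      · exact chernGB_len p q r (by omega) hex
    rw [List.length_append, List.length_append, hgc, hl1, hl2,
        PySem.List.length_pyRange_one, PySem.List.length_pyRange_one]
    simp only [List.length_nil]
    omega
  · -- odd
    rw [if_neg (by omega)]
    rw [flatMap_len_one _ (fun r hrm => by
      rcases hall r hrm with hskip | hex
      · omega
      · exact chernGB_len p q r (by omega) hex)]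
    rw [PySem.List.length_pyRange_one]
    omega

-- A's indexed difference loop is B's zip over consecutive pairs
theorem chern_diff_fold (xs : List Int) :
    ∀ (n : Nat), n + 1 ≤ xs.length → ∀ acc : List Int,
      ((PySem.List.pyRange 0 (n : Int)).foldl
        (fun acc i => acc ++ [PySem.List.pyGetD xs (i + 1) 0 - PySem.List.pyGetD xs i 0]) acc)
      = acc ++ (List.zipWith (fun a b => b - a) xs xs.tail).take n := by
  intro n
  induction n with
  | zero =>
    intro _ acc
    rw [show ((0 : Nat) : Int) = 0 by rfl, PySem.List.pyRange_one_eq_nil (by omega)]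
    simp
  | succ n ih =>
    intro hn acc
    have hn' : n + 1 ≤ xs.length := by omega
    rw [show ((n + 1 : Nat) : Int) = (n : Int) + 1 by push_cast; ring,
        PySem.List.pyRange_one_succ_right (by positivity), List.foldl_append, ih hn' acc]
    simp only [List.foldl_cons, List.foldl_nil]
    have hzl : (List.zipWith (fun a b => b - a) xs xs.tail).length = xs.length - 1 := by
      rw [List.length_zipWith, List.length_tail]
      omega
    have hlt : n < (List.zipWith (fun a b => b - a) xs xs.tail).length := by omega
    rw [List.take_add_one, List.getElem?_eq_getElem hlt]
    have h1 : PySem.List.pyGetD xs ((n : Int) + 1) 0 = xs[n + 1]'(by omega) := by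
      rw [show ((n : Int) + 1) = ((n + 1 : Nat) : Int) by push_cast; ring,
          PySem.List.pyGetD_natCast, List.getD_eq_getElem xs 0 (by omega)]
    have h2 : PySem.List.pyGetD xs (n : Int) 0 = xs[n]'(by omega) := by
      rw [PySem.List.pyGetD_natCast, List.getD_eq_getElem xs 0 (by omega)]
    rw [h1, h2, List.getElem_zipWith, List.getElem_tail]
    simp

theorem chern_diff_fold' (xs : List Int) (m : Int) (h0 : 0 ≤ m) (hm : m + 1 ≤ (xs.length : Int)) :
    ((PySem.List.pyRange 0 m).foldl
        (fun acc i => acc ++ [PySem.List.pyGetD xs (i + 1) 0 - PySem.List.pyGetD xs i 0]) [])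
      = (List.zipWith (fun a b => b - a) xs xs.tail).take m.toNat := by
  have h := chern_diff_fold xs m.toNat (by omega) []
  rw [show ((m.toNat : Nat) : Int) = m from by omega] at h
  simpa using h

theorem zip_map_sub (u v : List Int) :
    (u.zip v).map (fun ab => ab.2 - ab.1) = List.zipWith (fun a b => b - a) u v := by
  simp [List.zip, List.map_zipWith]


-- closed-form Pre_ ⇒ every unskipped band r has a (tr, sr) pair inside A's ranges
theorem pre_hall (p q : Int) (hq : 0 < q) (hpre : Pre_chern p q) :
    ∀ r ∈ PySem.List.pyRange 0 (q + 1),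
      (PySem.Int.mod q 2 = 0 ∧ 2 * r = q) ∨
      ∃ tr ∈ PySem.List.pyRange (-(PySem.Int.floordiv q 2)) (PySem.Int.floordiv q 2 + 1),
        PySem.Int.mod (r - p * tr) q = 0 ∧
        -q ≤ PySem.Int.floordiv (r - p * tr) q ∧ PySem.Int.floordiv (r - p * tr) q ≤ q := by
  intro r hr
  rw [PySem.List.mem_pyRange_one] at hr
  have hqne : q ≠ 0 := by omega
  have hfd : PySem.Int.floordiv q 2 = q / 2 := PySem.Int.floordiv_eq_ediv_of_pos (by norm_num)
  have hmod2 : PySem.Int.mod q 2 = q % 2 := PySem.Int.mod_eq_emod_of_pos (by norm_num)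
  have hmodq : ∀ x : Int, PySem.Int.mod x q = x % q := fun x => PySem.Int.mod_eq_emod_of_pos hq
  have hfdq : ∀ x : Int, PySem.Int.floordiv x q = x / q := fun x => PySem.Int.floordiv_eq_ediv_of_pos hq
  rcases hpre with ⟨_, hq2⟩ | ⟨hq3, hg, hb1, hb2, hb3, hb4⟩ | ⟨hneg, _⟩
  · -- q = 1 or q = 2: tr = 0 always works (for q = 2, r = 1 is the skipped band)
    rcases (show q = 1 ∨ q = 2 by omega) with h1 | h2
    · subst h1
      right
      refine ⟨0, ?_, ?_, ?_⟩
      · rw [PySem.List.mem_pyRange_one, hfd]; omega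
      · rw [hmodq]; omega
      · rw [hfdq]; omega
    · subst h2
      rcases (show r = 1 ∨ r = 0 ∨ r = 2 by omega) with h | h
      · exact Or.inl ⟨by rw [hmod2]; decide, by omega⟩
      · right
        refine ⟨0, ?_, ?_, ?_⟩
        · rw [PySem.List.mem_pyRange_one, hfd]; omega
        · rw [hmodq]; omega
        · rw [hfdq]; omega
  · -- q ≥ 3
    by_cases hskip : PySem.Int.mod q 2 = 0 ∧ 2 * r = q
    · exact Or.inl hskip
    right
    -- normalise the endpoint hypotheses into bounds on p * a
    have ha : (q % 2 = 0 ∧ chernBound q = q / 2 - 1) ∨ (q % 2 = 1 ∧ chernBound q = q / 2) := by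
      rw [chernBound, hmod2, hfd]
      rcases Int.emod_two_eq q with h | h
      · exact Or.inl ⟨h, by rw [if_pos h]⟩
      · exact Or.inr ⟨h, by rw [if_neg (by omega)]⟩
    set a := chernBound q with hadef
    have hh1 : 1 ≤ q / 2 := by omega
    have ha0 : 0 ≤ a ∧ a ≤ q / 2 := by omega
    have hA1 : -q * q ≤ p * a := (PySem.Int.le_floordiv_iff_mul_le hq).mp hb1
    have hA2 : p * a < (q + 1) * q := (PySem.Int.floordiv_lt_iff_lt_mul hq).mp (by omega)
    have hA3 : -q * q ≤ p * -a := (PySem.Int.le_floordiv_iff_mul_le hq).mp hb3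
    have hA4 : p * -a < (q + 1) * q := (PySem.Int.floordiv_lt_iff_lt_mul hq).mp (by omega)
    have e1 : -q * q = -(q * q) := by ring
    have e3 : p * -a = -(p * a) := by ring
    rw [e1] at hA1 hA3
    rw [e3] at hA3 hA4
    have hpa : -(q * q) ≤ p * a ∧ p * a ≤ q * q := by omega
    rcases (show r = q ∨ r < q by omega) with hrq | hrq
    · -- the top band r = q: tr = 0, sr = 1
      subst hrq
      refine ⟨0, ?_, ?_, ?_⟩
      · rw [PySem.List.mem_pyRange_one, hfd]; omega
      · rw [hmodq]; simp
      · rw [hfdq]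
        simp only [mul_zero, sub_zero]
        rw [Int.ediv_self hqne]
        omega
    · -- 0 ≤ r < q: shift the Bézout solution into [-q/2, chernBound q]
      obtain ⟨u, v, huv⟩ := Int.isCoprime_iff_gcd_eq_one.mpr hg
      set t0 := (r * u + q / 2) % q - q / 2 with ht0
      have hem1 : 0 ≤ (r * u + q / 2) % q := Int.emod_nonneg _ hqne
      have hem2 : (r * u + q / 2) % q < q := Int.emod_lt_of_pos _ hq
      have hK : (r * u + q / 2) % q = r * u + q / 2 - q * ((r * u + q / 2) / q) :=
        Int.emod_def _ _
      have hdvd : q ∣ r - p * t0 :=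
        ⟨r * v + p * ((r * u + q / 2) / q), by rw [ht0, hK]; linear_combination (-r) * huv⟩
      obtain ⟨m, hm⟩ := hdvd
      -- t0 stays within [-a, a]
      have ht0a : -a ≤ t0 ∧ t0 ≤ a := by
        rcases ha with ⟨he, haeq⟩ | ⟨ho, haeq⟩
        · -- q even: t0 ∈ [-q/2, q/2 - 1]; t0 = -q/2 would force r to be the skipped band
          constructor
          · by_contra hlt
            have ht0v : t0 = -(q / 2) := by omega
            -- p is odd since gcd(p, q) = 1 and q is even
            have hpodd : p % 2 = 1 := by
              rcases Int.emod_two_eq p with hpe | hpo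
              · exfalso
                have h2p : (2 : Int) ∣ p := by omega
                have h2q : (2 : Int) ∣ q := by omega
                have := Int.dvd_gcd h2p h2q
                rw [hg] at this
                norm_num at this
              · exact hpo
            obtain ⟨w, hw⟩ : ∃ w, p = 2 * w + 1 := ⟨(p - 1) / 2, by omega⟩
            obtain ⟨k, hk⟩ : q ∣ r - q / 2 :=
              ⟨m - w - 1, by rw [ht0v] at hm; linear_combination hm - (q / 2) * hw + (w + 1) * (by omega : q = 2 * (q / 2))⟩
            have hk0 : k = 0 := by
              by_contra hkne
              rcases lt_or_gt_of_ne hkne with hlt' | hgt'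
              · have h1 := mul_le_mul_of_nonneg_left (show k ≤ -1 by omega) (le_of_lt hq)
                have h2 : q * (-1 : Int) = -q := by ring
                omega
              · have h1 := mul_le_mul_of_nonneg_left (show (1 : Int) ≤ k by omega) (le_of_lt hq)
                have h2 : q * (1 : Int) = q := by ring
                omega
            rw [hk0, mul_zero] at hk
            exact hskip ⟨by omega, by omega⟩
          · omega
        · -- q odd: t0 ∈ [-q/2, q/2] = [-a, a]
          omega
      -- |p * t0| ≤ q²
      have hP : -(q * q) ≤ p * t0 ∧ p * t0 ≤ q * q := by
        rcases (show 0 ≤ p ∨ p < 0 by omega) with hp | hp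
        · have l1 := mul_le_mul_of_nonneg_left ht0a.1 hp
          have l2 := mul_le_mul_of_nonneg_left ht0a.2 hp
          rw [e3] at l1
          omega
        · have l1 := mul_le_mul_of_nonpos_left ht0a.1 (le_of_lt hp)
          have l2 := mul_le_mul_of_nonpos_left ht0a.2 (le_of_lt hp)
          rw [e3] at l1
          omega
      -- bounds on the multiplier m = sr
      have hm1 : -q ≤ m ∧ m ≤ q := by
        constructor
        · by_contra hc
          have h1 := mul_le_mul_of_nonneg_left (show m ≤ -q - 1 by omega) (le_of_lt hq)
          have h2 : q * (-q - 1) = -(q * q) - q := by ring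
          omega
        · by_contra hc
          have h1 := mul_le_mul_of_nonneg_left (show q + 1 ≤ m by omega) (le_of_lt hq)
          have h2 : q * (q + 1) = q * q + q := by ring
          omega
      refine ⟨t0, ?_, ?_, ?_⟩
      · rw [PySem.List.mem_pyRange_one, hfd]; omega
      · rw [hmodq]
        rw [hm]
        simp [Int.mul_emod_right]
      · rw [hfdq, hm, Int.mul_ediv_cancel_left _ hqne]
        exact hm1
  · omega

-- ===== VERDICT (by name: the statement is the Claim_ definition above) =====
theorem chern_spec : Claim_equal_chern := by
  intro p q hdom hpre
  show chern p q = chern_alt p q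
  by_cases hq : 0 < q
  · -- q > 0: Pre_ gives every unskipped band a (tr, sr) pair
    have hall := pre_hall p q hq hpre
    have hT := chern_trs_len p q hq hall
    simp only [chern, chern_alt, chern_trs_eq]
    rcases PySem.Int.mod_two_eq q with he | ho2
    · -- q even
      rw [if_pos he] at hT
      obtain ⟨c, hc⟩ := (PySem.Int.mod_eq_zero_iff_dvd q 2).mp he
      have hc1 : 1 ≤ c := by omega
      have hfd : PySem.Int.floordiv q 2 = c := by
        rw [PySem.Int.floordiv_eq_ediv_of_pos (show (0:Int) < 2 by norm_num), hc,
            Int.mul_ediv_cancel_left c (by norm_num)]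
      have hnumb : (if (PySem.Int.mod q 2 != 0) = true then q else q - 1) = q - 1 := by
        rw [he]; simp
      rw [hnumb, chern_diff_fold' (chernLoopB p q) (q - 1) (by omega) (by omega)]
      have hzl : (List.zipWith (fun a b => b - a) (chernLoopB p q) (chernLoopB p q).tail).length
          = q.toNat - 1 := by
        rw [List.length_zipWith, List.length_tail, hT]
        omega
      rw [List.take_of_length_le (by omega)]
      have hgB : (PySem.Int.mod q 2 == 0 && decide (0 < q)) = true := by
        rw [he]; simp [hq]
      rw [hgB, if_pos rfl, PySem.List.slice_from_one, zip_map_sub]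
      have hk : PySem.Int.floordiv q 2 - 1 = ((c - 1).toNat : Int) := by omega
      rw [show (PySem.Int.mod q 2 == 0) = true from by rw [he]; rfl, if_pos rfl]
      rw [hk, PySem.List.insert_natCast _ _ _ (by rw [hzl]; omega),
          PySem.List.slice_to _ (by positivity), PySem.List.slice_from _ (by positivity),
          PySem.List.pyGetD_natCast]
      simp
    · -- q odd
      rw [if_neg (by omega)] at hT
      have hnumb : (if (PySem.Int.mod q 2 != 0) = true then q else q - 1) = q := by
        rw [ho2]; simp
      rw [hnumb, chern_diff_fold' (chernLoopB p q) q (by omega) (by omega)]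
      have hzl : (List.zipWith (fun a b => b - a) (chernLoopB p q) (chernLoopB p q).tail).length
          = q.toNat := by
        rw [List.length_zipWith, List.length_tail, hT]
        omega
      rw [List.take_of_length_le (by omega)]
      have h0 : (PySem.Int.mod q 2 == 0) = false := by rw [ho2]; rfl
      rw [h0, PySem.List.slice_from_one, zip_map_sub]
      simp
  · -- q < 0 and odd: both programs return ([], [])
    have ho : PySem.Int.mod q 2 = 1 := by
      rcases hpre with ⟨h1, _⟩ | ⟨h1, _⟩ | ⟨_, h2⟩ <;> omega
    have hqneg : q < 0 := by
      rcases hpre with ⟨h1, _⟩ | ⟨h1, _⟩ | ⟨h2, _⟩ <;> omega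
    have hnil : PySem.List.pyRange 0 (q + 1) = [] := PySem.List.pyRange_one_eq_nil (by omega)
    have hA : chernLoopA p q = ([], [], []) := by rw [chernLoopA, hnil]; rfl
    have hB : chernLoopB p q = [] := by rw [chernLoopB, hnil]; rfl
    have hnil2 : PySem.List.pyRange 0 q = [] := PySem.List.pyRange_one_eq_nil (by omega)
    have h0 : (PySem.Int.mod q 2 == 0) = false := by rw [ho]; rfl
    have hnumb : (if (PySem.Int.mod q 2 != 0) = true then q else q - 1) = q := by
      rw [ho]; simp
    simp only [chern, chern_alt, hA, hB, hnumb, hnil2, h0, Bool.false_and, List.foldl_nil,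
      Bool.false_eq_true, if_false]
    simp
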